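-- pv_equiv track=rewrite | github.com/ctrl-alt-d/django-aula | aula/utils/tools.py | getSoftColor
-- ===== SOURCE A (Python) =====
-- def unicode(text, codi=None):
--     return str(text)
--
-- def getSoftColor( obj ):
--     strc = unicode( obj ) + u'con mucha marcha'
--     i = 0
--     j = 77
--     for s in strc:
--         i += ( 103 * ord( s ) ) % 2001
--         j = j % 573 + i * 5
--     i = i*i
--
--     gros = 200 + i%55
--     mitja1 = 100 + j%155
--     mitja2 = 150 + (i+j)%105
--
--     color=(None,None,None)
--     if i%3 == 0:
--         if i%2 ==0:
--             color = ( gros, mitja1, mitja2 )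
--         else:
--             color = ( gros, mitja2, mitja1 )
--     elif i%3 == 1:
--         if i%2 ==0:
--             color = ( mitja1, gros, mitja2 )
--         else:
--             color = ( mitja2, gros, mitja1 )
--     elif i%3 == 2:
--         if i%2 ==0:
--             color = ( mitja1, mitja2, gros )
--         else:
--             color = ( mitja2, mitja1, gros )
--
--     return u'#{0:02X}{1:02X}{2:02X}'.format( color[0], color[1], color[2] )
-- ===== SOURCE B (Python) =====
-- _PERMS = ((0, 1, 2), (1, 0, 2), (1, 2, 0), (0, 2, 1), (2, 0, 1), (2, 1, 0))
--
-- def getSoftColor(obj):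
--     terms = [(103 * ord(c)) % 2001 for c in (str(obj) + u'con mucha marcha')]
--     n = len(terms)
--     t = sum(terms)
--     w = sum((n - 1 - k) * x for k, x in enumerate(terms))
--     i = t * t
--     j = (77 + 5 * w) % 573 + 5 * t
--     vals = (200 + i % 55, 100 + j % 155, 150 + (i + j) % 105)
--     p = _PERMS[3 * (i % 2) + i % 3]
--     return u'#' + ''.join(u'{0:02X}'.format(vals[k]) for k in p)
-- ===== Notes on version B (the rewrite author's own statement) =====
-- stated objective: alternative
-- what changed: A's per-character stateful recurrence j = j%573 + 5*prefix is replaced by a closed form j = (77 + 5*W) % 573 + 5*T computed from two linear aggregates (term sum T and position-weighted sum W = sum (n-1-k)*term_k), exploiting that the mod-573 residue propagates linearly; the six-branch nested if/elif is replaced by a lookup in a table of the six permutations indexed by 3*(i%2)+i%3.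
import Mathlib
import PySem

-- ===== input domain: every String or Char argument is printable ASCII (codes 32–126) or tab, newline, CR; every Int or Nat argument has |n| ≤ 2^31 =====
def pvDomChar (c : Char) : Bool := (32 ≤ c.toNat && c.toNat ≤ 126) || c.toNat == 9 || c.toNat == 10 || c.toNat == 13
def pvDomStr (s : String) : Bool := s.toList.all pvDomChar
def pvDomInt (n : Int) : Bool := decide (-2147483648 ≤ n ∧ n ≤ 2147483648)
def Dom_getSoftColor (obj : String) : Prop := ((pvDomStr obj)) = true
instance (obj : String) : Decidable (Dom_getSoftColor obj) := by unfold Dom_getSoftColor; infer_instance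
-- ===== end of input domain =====

-- B replaces A's per-character stateful recurrence for j by a closed form built from two
-- linear aggregates (term sum and position-weighted sum), and the six-branch permutation
-- selection by a lookup in a table of permutations (objective: alternative).

-- ===== PORT A =====
-- '{0:02X}'.format(n): exact for 0 ≤ n < 256 (all color components here lie in 100..254,
-- so the value always has exactly two hex digits and the 02 padding never fires)
def pvHex2 (n : Int) : String :=
  let digits : List Char := ['0','1','2','3','4','5','6','7','8','9','A','B','C','D','E','F']
  let m := n.toNat
  String.ofList [digits.getD (m / 16) '0', digits.getD (m % 16) '0']

def getSoftColor (obj : String) : String :=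
  let strc := obj ++ "con mucha marcha"   -- unicode(obj) = str(obj) is the identity on strings
  let p := strc.toList.foldl (fun (p : Int × Int) s =>
      let i := p.1 + PySem.Int.mod (103 * (s.toNat : Int)) 2001
      (i, PySem.Int.mod p.2 573 + i * 5)) (0, 77)
  let i := p.1 * p.1
  let j := p.2
  let gros := 200 + PySem.Int.mod i 55
  let mitja1 := 100 + PySem.Int.mod j 155
  let mitja2 := 150 + PySem.Int.mod (i + j) 105
  let color : Int × Int × Int :=
    if PySem.Int.mod i 3 = 0 then
      if PySem.Int.mod i 2 = 0 then (gros, mitja1, mitja2) else (gros, mitja2, mitja1)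
    else if PySem.Int.mod i 3 = 1 then
      if PySem.Int.mod i 2 = 0 then (mitja1, gros, mitja2) else (mitja2, gros, mitja1)
    else if PySem.Int.mod i 3 = 2 then
      if PySem.Int.mod i 2 = 0 then (mitja1, mitja2, gros) else (mitja2, mitja1, gros)
    else (0, 0, 0)   -- unreachable (i%3 ∈ {0,1,2}); Python's color=(None,None,None) would raise in format
  "#" ++ pvHex2 color.1 ++ pvHex2 color.2.1 ++ pvHex2 color.2.2

-- ===== PORT B =====
def pvPerms : List (Nat × Nat × Nat) :=
  [(0, 1, 2), (1, 0, 2), (1, 2, 0), (0, 2, 1), (2, 0, 1), (2, 1, 0)]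

-- vals[k] for a 3-tuple (k is 0, 1 or 2 here)
def pvPick (v : Int × Int × Int) (k : Nat) : Int :=
  match k with
  | 0 => v.1
  | 1 => v.2.1
  | _ => v.2.2

def getSoftColor_alt (obj : String) : String :=
  let terms := (obj ++ "con mucha marcha").toList.map
      (fun c => PySem.Int.mod (103 * (c.toNat : Int)) 2001)
  let n := terms.length
  let t := terms.sum
  let w := ((terms.zipIdx).map (fun q => ((n : Int) - 1 - (q.2 : Int)) * q.1)).sum
  let i := t * t
  let j := PySem.Int.mod (77 + 5 * w) 573 + 5 * t
  let vals : Int × Int × Int :=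
    (200 + PySem.Int.mod i 55, 100 + PySem.Int.mod j 155, 150 + PySem.Int.mod (i + j) 105)
  let p := pvPerms.getD (3 * (PySem.Int.mod i 2).toNat + (PySem.Int.mod i 3).toNat) (0, 0, 0)
  "#" ++ String.join ([p.1, p.2.1, p.2.2].map (fun k => pvHex2 (pvPick vals k)))

-- ===== PRECONDITION & SPEC =====
def Spec_getSoftColor (obj : String) (out : String) : Prop := out = getSoftColor_alt obj
instance (obj : String) (out : String) : Decidable (Spec_getSoftColor obj out) := by unfold Spec_getSoftColor; infer_instance

-- ===== CLAIM (what is proved, stated in full; the proofs are below) =====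
def Claim_equal_getSoftColor : Prop := ∀ (obj : String), Dom_getSoftColor obj → Spec_getSoftColor obj (getSoftColor obj)

-- ===== LEMMAS AND PROOFS =====

-- the per-character term (proof-side abbreviation for A's fold increment)
def pvF (c : Char) : Int := PySem.Int.mod (103 * (c.toNat : Int)) 2001

-- weighted sum with weights (length-1), (length-2), …, 1, 0 (proof-side recursion)
def pvWsum : List Int → Int
  | [] => 0
  | t :: rest => (rest.length : Int) * t + pvWsum rest

-- sum of the running prefix sums (offset a) over all but the last element (proof-side recursion)
def pvPsum : List Int → Int → Int
  | [], _ => 0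
  | [_], _ => 0
  | t :: u :: r, a => (a + t) + pvPsum (u :: r) (a + t)

-- B's position-weighted sum equals pvWsum plus a correction that vanishes at k=0, c=length-1
theorem pvZipIdx_wsum (l : List Int) (k : Nat) (c : Int) :
    ((l.zipIdx k).map (fun q => (c - (q.2 : Int)) * q.1)).sum
      = pvWsum l + (c - (k : Int) - ((l.length : Int) - 1)) * l.sum := by
  induction l generalizing k with
  | nil => simp [pvWsum]
  | cons t rest ih =>
    simp only [List.zipIdx_cons, List.map_cons, List.sum_cons, ih (k + 1), pvWsum,
      List.length_cons, List.sum_cons]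
    push_cast
    ring

theorem pvPsum_eq (l : List Int) (a : Int) (hne : l ≠ []) :
    pvPsum l a = ((l.length : Int) - 1) * a + pvWsum l := by
  induction l generalizing a with
  | nil => simp at hne
  | cons t rest ih =>
    cases rest with
    | nil => simp [pvPsum, pvWsum]
    | cons u r =>
      simp only [pvPsum, ih _ (by simp), pvWsum, List.length_cons]
      push_cast
      ring

-- (x % 573 + y) % 573 = (x + y) % 573 for Python mod with positive divisor
theorem pvModAdd (x y : Int) :
    PySem.Int.mod (PySem.Int.mod x 573 + y) 573 = PySem.Int.mod (x + y) 573 := by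
  have h : ∀ a : Int, PySem.Int.mod a 573 = a % 573 :=
    fun a => PySem.Int.mod_eq_emod_of_pos (by norm_num)
  rw [h, h, h]
  omega

-- A's fold in closed form: first component a + sum, second (j + 5*psum) % 573 + 5*(a + sum)
theorem pvFold_closed (l : List Int) (a j : Int) (hne : l ≠ []) :
    (l.foldl (fun (q : Int × Int) t => (q.1 + t, PySem.Int.mod q.2 573 + (q.1 + t) * 5)) (a, j))
      = (a + l.sum, PySem.Int.mod (j + 5 * pvPsum l a) 573 + (a + l.sum) * 5) := by
  induction l generalizing a j with
  | nil => simp at hne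
  | cons t rest ih =>
    cases rest with
    | nil => simp [pvPsum]
    | cons u r =>
      rw [List.foldl_cons, ih (a + t) _ (by simp)]
      have h2 : PySem.Int.mod (PySem.Int.mod j 573 + (a + t) * 5 + 5 * pvPsum (u :: r) (a + t)) 573
          = PySem.Int.mod (j + 5 * pvPsum (t :: u :: r) a) 573 := by
        rw [add_assoc, pvModAdd]
        congr 1
        simp only [pvPsum]
        ring
      simp only [List.sum_cons, h2, Prod.mk.injEq]
      exact ⟨by ring, by ring⟩

-- the same, phrased on A's character fold
theorem pvFoldChar (l : List Char) (a j : Int) (hne : l ≠ []) :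
    (l.foldl (fun (p : Int × Int) s =>
        (p.1 + PySem.Int.mod (103 * (s.toNat : Int)) 2001,
         PySem.Int.mod p.2 573 + (p.1 + PySem.Int.mod (103 * (s.toNat : Int)) 2001) * 5)) (a, j))
      = (a + (l.map pvF).sum,
         PySem.Int.mod (j + 5 * pvPsum (l.map pvF) a) 573 + (a + (l.map pvF).sum) * 5) := by
  have h := pvFold_closed (l.map pvF) a j (by simpa using hne)
  rw [List.foldl_map] at h
  exact h

-- the six branches of A equal B's permutation-table pick, for any i and j
theorem pvBranch_eq (i j : Int) :
    (let gros := 200 + PySem.Int.mod i 55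
     let mitja1 := 100 + PySem.Int.mod j 155
     let mitja2 := 150 + PySem.Int.mod (i + j) 105
     let color : Int × Int × Int :=
       if PySem.Int.mod i 3 = 0 then
         if PySem.Int.mod i 2 = 0 then (gros, mitja1, mitja2) else (gros, mitja2, mitja1)
       else if PySem.Int.mod i 3 = 1 then
         if PySem.Int.mod i 2 = 0 then (mitja1, gros, mitja2) else (mitja2, gros, mitja1)
       else if PySem.Int.mod i 3 = 2 then
         if PySem.Int.mod i 2 = 0 then (mitja1, mitja2, gros) else (mitja2, mitja1, gros)
       else (0, 0, 0);
     "#" ++ pvHex2 color.1 ++ pvHex2 color.2.1 ++ pvHex2 color.2.2)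
    = (let vals : Int × Int × Int :=
         (200 + PySem.Int.mod i 55, 100 + PySem.Int.mod j 155, 150 + PySem.Int.mod (i + j) 105)
       let p := pvPerms.getD (3 * (PySem.Int.mod i 2).toNat + (PySem.Int.mod i 3).toNat) (0, 0, 0)
       "#" ++ String.join ([p.1, p.2.1, p.2.2].map (fun k => pvHex2 (pvPick vals k)))) := by
  have h3 : PySem.Int.mod i 3 = 0 ∨ PySem.Int.mod i 3 = 1 ∨ PySem.Int.mod i 3 = 2 := by
    have h1 := PySem.Int.mod_nonneg i (b := 3) (by norm_num)
    have h2 := PySem.Int.mod_lt i (b := 3) (by norm_num)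
    omega
  have h2 : PySem.Int.mod i 2 = 0 ∨ PySem.Int.mod i 2 = 1 := by
    have h1 := PySem.Int.mod_nonneg i (b := 2) (by norm_num)
    have h2 := PySem.Int.mod_lt i (b := 2) (by norm_num)
    omega
  rcases h3 with h3 | h3 | h3 <;> rcases h2 with h2 | h2 <;>
    simp only [h3, h2] <;>
    norm_num [pvPerms, pvPick, List.getD, String.join, String.append_assoc,
      (show Int.toNat 2 = 2 from rfl), (show Int.toNat 1 = 1 from rfl)]

-- ===== VERDICT (by name: the statement is the Claim_ definition above) =====
theorem getSoftColor_spec : Claim_equal_getSoftColor := by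
  intro obj _
  unfold Spec_getSoftColor getSoftColor getSoftColor_alt
  have hne : (obj ++ "con mucha marcha").toList ≠ [] := by
    intro h
    have := congrArg List.length h
    simp at this
  obtain ⟨l, hl⟩ : ∃ l, (obj ++ "con mucha marcha").toList = l := ⟨_, rfl⟩
  rw [hl] at hne
  simp only [hl]
  rw [pvFoldChar l 0 77 hne]
  have hmapF : l.map pvF
      = l.map (fun c => PySem.Int.mod (103 * (c.toNat : Int)) 2001) := rfl
  rw [hmapF]
  set T := l.map (fun c => PySem.Int.mod (103 * (c.toNat : Int)) 2001) with hT
  have htne : T ≠ [] := by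
    rw [hT]
    simpa using hne
  have hw : (T.zipIdx.map (fun q => ((T.length : Int) - 1 - (q.2 : Int)) * q.1)).sum
      = pvWsum T := by
    have h := pvZipIdx_wsum T 0 ((T.length : Int) - 1)
    simpa [sub_sub] using h
  have hp : pvPsum T 0 = pvWsum T := by
    simp [pvPsum_eq _ _ htne]
  simp only [hw, hp, zero_add]
  have hmain := pvBranch_eq (T.sum * T.sum)
      (PySem.Int.mod (77 + 5 * pvWsum T) 573 + 5 * T.sum)
  rw [show T.sum * 5 = 5 * T.sum from mul_comm _ _]
  exact hmain
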